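-- pv_equiv track=rewrite | github.com/chen21439/layoutlmft | examples/infer/util/pdf_extractor.py | find_two_column_spliter
-- ===== SOURCE A (Python) =====
-- def find_two_column_spliter(content_lines, page2img_size):
--     spliter = []
--     for page_id in range(len(content_lines)):
--         boxes = [x[1] for x in content_lines[page_id]]
--         page_width = page2img_size[page_id][0]
--         l_box_ids, r_box_ids = [], []
--         for i in range(len(boxes)):
--             x0, x1 = boxes[i][0], boxes[i][2]
--             if (x1-x0) < page_width/3:
--                 continue
--             if x1 < page_width/2:
--                 l_box_ids.append(i)
--             if x0 > page_width/2:
--                 r_box_ids.append(i)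
--         l_l = min([boxes[i][0] for i in l_box_ids]) if len(l_box_ids) != 0 else -1
--         l_r = max([boxes[i][2] for i in l_box_ids]) if len(l_box_ids) != 0 else -1
--         r_l = min([boxes[i][0] for i in r_box_ids]) if len(r_box_ids) != 0 else -1
--         r_r = max([boxes[i][2] for i in r_box_ids]) if len(r_box_ids) != 0 else -1
--         spliter.append([l_l, l_r, r_l, r_r])
--     return spliter
-- ===== SOURCE B (Python) =====
-- def find_two_column_spliter(content_lines, page2img_size):
--     # Single pass per page: running (min_x0, max_x2) accumulators per column,
--     # None meaning "no box seen yet" (emitted as -1).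
--     # Integer comparisons 3*(x1-x0) < w and 2*x < w are exact versions of
--     # A's float comparisons for |w| <= 2**31.
--     result = []
--     for page, size in zip(content_lines, page2img_size):
--         w = size[0]
--         left = right = None
--         for _, box in page:
--             x0, x1 = box[0], box[2]
--             if 3 * (x1 - x0) < w:
--                 continue
--             if 2 * x1 < w:
--                 left = (x0, x1) if left is None else (min(left[0], x0), max(left[1], x1))
--             if 2 * x0 > w:
--                 right = (x0, x1) if right is None else (min(right[0], x0), max(right[1], x1))
--         l = left if left is not None else (-1, -1)
--         r = right if right is not None else (-1, -1)
--         result.append([l[0], l[1], r[0], r[1]])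
--     return result
-- ===== Notes on version B (the rewrite author's own statement) =====
-- stated objective: simpler
-- what changed: Replaces the index-list construction plus four rescanning min/max comprehensions per page with one single pass over the boxes that keeps optional running (min_x0, max_x2) accumulators per column, and iterates pages by zipping content_lines with page2img_size instead of indexing.
import Mathlib
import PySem

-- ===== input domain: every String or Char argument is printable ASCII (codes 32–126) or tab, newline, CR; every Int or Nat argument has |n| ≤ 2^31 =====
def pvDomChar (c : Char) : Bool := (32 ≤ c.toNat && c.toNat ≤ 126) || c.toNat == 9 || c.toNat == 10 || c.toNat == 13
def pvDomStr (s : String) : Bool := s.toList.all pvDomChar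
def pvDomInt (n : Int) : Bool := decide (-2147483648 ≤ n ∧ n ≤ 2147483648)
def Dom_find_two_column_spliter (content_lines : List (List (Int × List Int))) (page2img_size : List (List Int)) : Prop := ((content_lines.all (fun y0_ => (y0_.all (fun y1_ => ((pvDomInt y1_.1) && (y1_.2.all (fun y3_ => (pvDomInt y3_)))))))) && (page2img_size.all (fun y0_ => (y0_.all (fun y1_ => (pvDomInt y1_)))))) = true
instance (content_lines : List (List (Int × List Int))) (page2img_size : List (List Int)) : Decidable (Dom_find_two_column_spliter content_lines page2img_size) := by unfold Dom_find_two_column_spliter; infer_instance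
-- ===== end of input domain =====

-- B replaces A's per-page index lists and four rescanning min/max comprehensions by one
-- single pass with optional running (min_x0, max_x2) accumulators per column, zipping the
-- pages with their sizes (objective: simpler).

-- ===== PORT A =====
-- The float comparisons '(x1-x0) < page_width/3' and 'x < page_width/2' are ported as the
-- exact integer comparisons '3*(x1-x0) < page_width' and '2*x < page_width'; this is exact
-- on the stated domain |page_width| ≤ 2^31 (the rounding error of page_width/3 as a double
-- is below the distance 1/3 from the nearest integer, and page_width/2 is exact).
def find_two_column_spliter (content_lines : List (List (Int × List Int))) (page2img_size : List (List Int)) : List (List Int) :=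
  (PySem.List.pyRange 0 (content_lines.length : Int) 1).foldl (fun spliter page_id =>
    let boxes := (PySem.List.pyGetD content_lines page_id []).map (fun x => x.2)
    let page_width := PySem.List.pyGetD (PySem.List.pyGetD page2img_size page_id []) 0 0
    let ids := (PySem.List.pyRange 0 (boxes.length : Int) 1).foldl (fun (p : List Int × List Int) i =>
      let x0 := PySem.List.pyGetD (PySem.List.pyGetD boxes i []) 0 0
      let x1 := PySem.List.pyGetD (PySem.List.pyGetD boxes i []) 2 0
      if 3*(x1-x0) < page_width then p
      else (if 2*x1 < page_width then p.1 ++ [i] else p.1,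
            if 2*x0 > page_width then p.2 ++ [i] else p.2)) ([], [])
    let l_l := if ids.1.length ≠ 0 then (PySem.List.min? (ids.1.map (fun i => PySem.List.pyGetD (PySem.List.pyGetD boxes i []) 0 0)) (fun y => y)).getD 0 else -1
    let l_r := if ids.1.length ≠ 0 then (PySem.List.max? (ids.1.map (fun i => PySem.List.pyGetD (PySem.List.pyGetD boxes i []) 2 0)) (fun y => y)).getD 0 else -1
    let r_l := if ids.2.length ≠ 0 then (PySem.List.min? (ids.2.map (fun i => PySem.List.pyGetD (PySem.List.pyGetD boxes i []) 0 0)) (fun y => y)).getD 0 else -1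
    let r_r := if ids.2.length ≠ 0 then (PySem.List.max? (ids.2.map (fun i => PySem.List.pyGetD (PySem.List.pyGetD boxes i []) 2 0)) (fun y => y)).getD 0 else -1
    spliter ++ [[l_l, l_r, r_l, r_r]]) []

-- ===== PORT B =====
-- 'left = (x0, x1) if left is None else (min(left[0], x0), max(left[1], x1))'
def pvUpd (o : Option (Int × Int)) (x0 x1 : Int) : Option (Int × Int) :=
  match o with
  | none => some (x0, x1)
  | some (a, c) => some (min a x0, max c x1)

def find_two_column_spliter_alt (content_lines : List (List (Int × List Int))) (page2img_size : List (List Int)) : List (List Int) :=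
  (content_lines.zip page2img_size).foldl (fun result pz =>
    let w := PySem.List.pyGetD pz.2 0 0
    let st := pz.1.foldl (fun (st : Option (Int × Int) × Option (Int × Int)) x =>
      let box := x.2
      let x0 := PySem.List.pyGetD box 0 0
      let x1 := PySem.List.pyGetD box 2 0
      if 3*(x1-x0) < w then st
      else (if 2*x1 < w then pvUpd st.1 x0 x1 else st.1,
            if 2*x0 > w then pvUpd st.2 x0 x1 else st.2)) (none, none)
    let l := st.1.getD (-1, -1)
    let r := st.2.getD (-1, -1)
    result ++ [[l.1, l.2, r.1, r.2]]) []

-- ===== PRECONDITION & SPEC =====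
-- Pre_ excludes exactly the inputs on which A raises IndexError: a sizes list shorter than
-- the pages list, an empty size entry for a used page, or a box with fewer than 3 coordinates.
def Pre_find_two_column_spliter (content_lines : List (List (Int × List Int))) (page2img_size : List (List Int)) : Prop :=
  content_lines.length ≤ page2img_size.length ∧
  (∀ p ∈ page2img_size.take content_lines.length, p ≠ []) ∧
  (∀ page ∈ content_lines, ∀ x ∈ page, 3 ≤ x.2.length)
instance (content_lines : List (List (Int × List Int))) (page2img_size : List (List Int)) : Decidable (Pre_find_two_column_spliter content_lines page2img_size) := by unfold Pre_find_two_column_spliter; infer_instance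

def pvWitness_find_two_column_spliter : (List (List (Int × List Int))) × List (List Int) :=
  ([[(1, [0, 3, 9, 12])], [(2, [60, 3, 99, 12]), (7, [5, 3, 45, 12])]], [[100], [100]])

def Spec_find_two_column_spliter (content_lines : List (List (Int × List Int))) (page2img_size : List (List Int)) (out : List (List Int)) : Prop := out = find_two_column_spliter_alt content_lines page2img_size
instance (content_lines : List (List (Int × List Int))) (page2img_size : List (List Int)) (out : List (List Int)) : Decidable (Spec_find_two_column_spliter content_lines page2img_size out) := by unfold Spec_find_two_column_spliter; infer_instance

-- ===== CLAIM (what is proved, stated in full; the proofs are below) =====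
def Claim_equal_find_two_column_spliter : Prop := ∀ (content_lines : List (List (Int × List Int))) (page2img_size : List (List Int)), Dom_find_two_column_spliter content_lines page2img_size → Pre_find_two_column_spliter content_lines page2img_size → Spec_find_two_column_spliter content_lines page2img_size (find_two_column_spliter content_lines page2img_size)

-- ===== LEMMAS AND PROOFS =====

-- proof-only abbreviations (each definitionally equal to the corresponding port expression)
def pvX0 (b : List Int) : Int := PySem.List.pyGetD b 0 0
def pvX2 (b : List Int) : Int := PySem.List.pyGetD b 2 0
def pvQL (w : Int) (b : List Int) : Bool := !(decide (3*(PySem.List.pyGetD b 2 0 - PySem.List.pyGetD b 0 0) < w)) && decide (2*(PySem.List.pyGetD b 2 0) < w)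
def pvQR (w : Int) (b : List Int) : Bool := !(decide (3*(PySem.List.pyGetD b 2 0 - PySem.List.pyGetD b 0 0) < w)) && decide (2*(PySem.List.pyGetD b 0 0) > w)
def pvAcc (o : Option (Int × Int)) (b : List Int) : Option (Int × Int) := pvUpd o (pvX0 b) (pvX2 b)

def pvStepA (w : Int) (boxes : List (List Int)) (p : List Int × List Int) (i : Int) : List Int × List Int :=
  if 3*(PySem.List.pyGetD (PySem.List.pyGetD boxes i []) 2 0 - PySem.List.pyGetD (PySem.List.pyGetD boxes i []) 0 0) < w then p
  else (if 2*(PySem.List.pyGetD (PySem.List.pyGetD boxes i []) 2 0) < w then p.1 ++ [i] else p.1,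
        if 2*(PySem.List.pyGetD (PySem.List.pyGetD boxes i []) 0 0) > w then p.2 ++ [i] else p.2)

def pvRowA (page : List (Int × List Int)) (size : List Int) : List Int :=
  let boxes := page.map (fun x => x.2)
  let w := PySem.List.pyGetD size 0 0
  let ids := (PySem.List.pyRange 0 (boxes.length : Int) 1).foldl (pvStepA w boxes) ([], [])
  [if ids.1.length ≠ 0 then (PySem.List.min? (ids.1.map (fun i => pvX0 (PySem.List.pyGetD boxes i []))) (fun y => y)).getD 0 else -1,
   if ids.1.length ≠ 0 then (PySem.List.max? (ids.1.map (fun i => pvX2 (PySem.List.pyGetD boxes i []))) (fun y => y)).getD 0 else -1,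
   if ids.2.length ≠ 0 then (PySem.List.min? (ids.2.map (fun i => pvX0 (PySem.List.pyGetD boxes i []))) (fun y => y)).getD 0 else -1,
   if ids.2.length ≠ 0 then (PySem.List.max? (ids.2.map (fun i => pvX2 (PySem.List.pyGetD boxes i []))) (fun y => y)).getD 0 else -1]

def pvStepB (w : Int) (st : Option (Int × Int) × Option (Int × Int)) (b : List Int) : Option (Int × Int) × Option (Int × Int) :=
  if 3*(PySem.List.pyGetD b 2 0 - PySem.List.pyGetD b 0 0) < w then st
  else (if 2*(PySem.List.pyGetD b 2 0) < w then pvUpd st.1 (PySem.List.pyGetD b 0 0) (PySem.List.pyGetD b 2 0) else st.1,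
        if 2*(PySem.List.pyGetD b 0 0) > w then pvUpd st.2 (PySem.List.pyGetD b 0 0) (PySem.List.pyGetD b 2 0) else st.2)

def pvRowB (page : List (Int × List Int)) (size : List Int) : List Int :=
  let st := page.foldl (fun st x => pvStepB (PySem.List.pyGetD size 0 0) st x.2) (none, none)
  [(st.1.getD (-1, -1)).1, (st.1.getD (-1, -1)).2, (st.2.getD (-1, -1)).1, (st.2.getD (-1, -1)).2]

theorem pv_A_eq (cl : List (List (Int × List Int))) (ps : List (List Int)) :
    find_two_column_spliter cl ps
      = ((List.range cl.length).map (fun (k : Nat) => (k : Int))).foldl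
          (fun acc j => acc ++ [pvRowA (PySem.List.pyGetD cl j []) (PySem.List.pyGetD ps j [])]) [] := by
  unfold find_two_column_spliter
  rw [PySem.List.pyRange_zero_natCast]
  rfl

theorem pv_B_eq (cl : List (List (Int × List Int))) (ps : List (List Int)) :
    find_two_column_spliter_alt cl ps
      = (cl.zip ps).foldl (fun acc x => acc ++ [pvRowB x.1 x.2]) [] := by
  unfold find_two_column_spliter_alt
  rfl

-- A's index-building loop produces the two filtered index lists
theorem pv_idsFold (w : Int) (boxes : List (List Int)) :
    ∀ (l : List Int) (aL aR : List Int),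
    l.foldl (pvStepA w boxes) (aL, aR)
      = (aL ++ l.filter (fun i => pvQL w (PySem.List.pyGetD boxes i [])),
         aR ++ l.filter (fun i => pvQR w (PySem.List.pyGetD boxes i []))) := by
  intro l
  induction l with
  | nil => intro aL aR; simp
  | cons i t ih =>
    intro aL aR
    simp only [List.foldl_cons, List.filter_cons]
    by_cases h0 : 3*(PySem.List.pyGetD (PySem.List.pyGetD boxes i []) 2 0 - PySem.List.pyGetD (PySem.List.pyGetD boxes i []) 0 0) < w <;>
      by_cases hL : 2*(PySem.List.pyGetD (PySem.List.pyGetD boxes i []) 2 0) < w <;>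
        by_cases hR : 2*(PySem.List.pyGetD (PySem.List.pyGetD boxes i []) 0 0) > w <;>
          simp [pvStepA, h0, hL, hR, pvQL, pvQR, ih]

-- comprehension over the filtered indices = comprehension over the filtered boxes
theorem pv_filter_range_nat (boxes : List (List Int)) (q : List Int → Bool) (f : List Int → Int) :
    ((List.range boxes.length).filter (fun k => q (boxes.getD k []))).map (fun k => f (boxes.getD k []))
      = (boxes.filter q).map f := by
  induction boxes with
  | nil => simp
  | cons b t ih =>
    simp only [List.length_cons, List.range_succ_eq_map, List.filter_cons, List.getD_cons_zero]
    by_cases hb : q b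
    · simp only [hb, if_pos, List.map_cons, List.filter_map, List.map_map]
      refine congrArg₂ List.cons rfl ?_
      simpa [Function.comp, Nat.succ_eq_add_one, List.filter_map, List.map_map] using ih
    · simp only [hb, Bool.false_eq_true, if_neg, List.filter_map, List.map_map]
      simpa [Function.comp, Nat.succ_eq_add_one, List.filter_map, List.map_map] using ih

theorem pv_filter_range (boxes : List (List Int)) (q : List Int → Bool) (f : List Int → Int) :
    (((PySem.List.pyRange 0 (boxes.length : Int) 1).filter (fun i => q (PySem.List.pyGetD boxes i []))).map (fun i => f (PySem.List.pyGetD boxes i [])))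
      = (boxes.filter q).map f := by
  rw [PySem.List.pyRange_zero_natCast, List.filter_map, List.map_map]
  simp only [Function.comp_def, PySem.List.pyGetD_natCast]
  exact pv_filter_range_nat boxes q f

-- B's single pass splits into the two per-column filtered folds
theorem pv_bFold (w : Int) :
    ∀ (l : List (List Int)) (oL oR : Option (Int × Int)),
    l.foldl (pvStepB w) (oL, oR)
      = ((l.filter (pvQL w)).foldl pvAcc oL, (l.filter (pvQR w)).foldl pvAcc oR) := by
  intro l
  induction l with
  | nil => intro oL oR; simp
  | cons b t ih =>
    intro oL oR
    simp only [List.foldl_cons, List.filter_cons]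
    by_cases h0 : 3*(PySem.List.pyGetD b 2 0 - PySem.List.pyGetD b 0 0) < w <;>
      by_cases hL : 2*(PySem.List.pyGetD b 2 0) < w <;>
        by_cases hR : 2*(PySem.List.pyGetD b 0 0) > w <;>
          simp [pvStepB, pvAcc, pvX0, pvX2, h0, hL, hR, pvQL, pvQR, ih]

-- the running accumulator computes the running min/max pair
theorem pv_foldUpd : ∀ (l : List (List Int)) (a c : Int),
    l.foldl pvAcc (some (a, c))
      = some ((l.map pvX0).foldl min a, (l.map pvX2).foldl max c) := by
  intro l
  induction l with
  | nil => intro a c; simp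
  | cons b t ih => intro a c; simp [pvAcc, pvUpd, ih]

-- per-page equality of the two loop bodies
theorem pv_col_cons (b : List Int) (t : List (List Int)) :
    List.foldl pvAcc (pvAcc none b) t
      = some ((t.map pvX0).foldl min (pvX0 b), (t.map pvX2).foldl max (pvX2 b)) := by
  rw [show pvAcc none b = some (pvX0 b, pvX2 b) from rfl, pv_foldUpd]

theorem pv_row_eq (page : List (Int × List Int)) (size : List Int) :
    pvRowA page size = pvRowB page size := by
  unfold pvRowA pvRowB
  simp only []
  set w := PySem.List.pyGetD size 0 0 with hw
  set boxes := page.map (fun x => x.2) with hboxes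
  rw [pv_idsFold, List.nil_append, List.nil_append]
  have hmap : page.foldl (fun st x => pvStepB w st x.2) (none, none)
      = boxes.foldl (pvStepB w) (none, none) := by
    rw [hboxes]; exact List.foldl_map.symm
  rw [hmap, pv_bFold]
  have hLlen : ((PySem.List.pyRange 0 (boxes.length : Int) 1).filter (fun i => pvQL w (PySem.List.pyGetD boxes i []))).length
      = (boxes.filter (pvQL w)).length := by
    have h := congrArg List.length (pv_filter_range boxes (pvQL w) pvX0)
    simpa using h
  have hRlen : ((PySem.List.pyRange 0 (boxes.length : Int) 1).filter (fun i => pvQR w (PySem.List.pyGetD boxes i []))).length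
      = (boxes.filter (pvQR w)).length := by
    have h := congrArg List.length (pv_filter_range boxes (pvQR w) pvX0)
    simpa using h
  rw [pv_filter_range boxes (pvQL w) pvX0, pv_filter_range boxes (pvQL w) pvX2,
      pv_filter_range boxes (pvQR w) pvX0, pv_filter_range boxes (pvQR w) pvX2,
      hLlen, hRlen]
  cases hla : boxes.filter (pvQL w) with
  | nil =>
    cases hlb : boxes.filter (pvQR w) with
    | nil => simp
    | cons b t => simp [pv_col_cons, PySem.List.min?_id_cons, PySem.List.max?_id_cons]
  | cons b t =>
    cases hlb : boxes.filter (pvQR w) with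
    | nil => simp [pv_col_cons, PySem.List.min?_id_cons, PySem.List.max?_id_cons]
    | cons b' t' => simp [pv_col_cons, PySem.List.min?_id_cons, PySem.List.max?_id_cons]

-- iteration by index over the two parallel lists = iteration over their zip
theorem pv_idx_zip :
    ∀ (cl : List (List (Int × List Int))) (ps : List (List Int)) (init : List (List Int)),
    cl.length ≤ ps.length →
    (List.range cl.length).foldl
        (fun acc k => acc ++ [pvRowA (cl.getD k []) (ps.getD k [])]) init
      = (cl.zip ps).foldl (fun acc x => acc ++ [pvRowA x.1 x.2]) init := by
  intro cl
  induction cl with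
  | nil => intro ps init _; simp
  | cons c t ih =>
    intro ps init hlen
    cases ps with
    | nil => simp at hlen
    | cons p pt =>
      simp only [List.length_cons, List.range_succ_eq_map, List.foldl_cons, List.foldl_map,
        List.getD_cons_zero, List.zip_cons_cons, Nat.succ_eq_add_one, List.getD_cons_succ]
      exact ih pt _ (by simpa using Nat.le_of_succ_le_succ hlen)

-- ===== VERDICT (by name: the statement is the Claim_ definition above) =====
theorem find_two_column_spliter_spec : Claim_equal_find_two_column_spliter := by
  intro cl ps _ hpre
  unfold Spec_find_two_column_spliter
  rw [pv_A_eq, pv_B_eq, List.foldl_map]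
  simp only [PySem.List.pyGetD_natCast]
  rw [pv_idx_zip cl ps [] hpre.1]
  have hfun : (fun (acc : List (List Int)) (x : List (Int × List Int) × List Int) => acc ++ [pvRowA x.1 x.2])
      = (fun acc x => acc ++ [pvRowB x.1 x.2]) := by
    funext acc x
    rw [pv_row_eq]
  rw [hfun]
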